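-- pv_equiv track=rewrite | github.com/philipwilsonTHG/psh | psh/aliases.py | _is_valid_alias_name
-- ===== SOURCE A (Python) =====
-- def _is_valid_alias_name(name: str) -> bool:
--     """Check if alias name is valid."""
--     if not name:
--         return False
--
--     # Cannot contain certain characters
--     invalid_chars = ['=', '/', ' ', '\t', '\n', '|', '&', ';', '(', ')', '<', '>', '`', '$', '"', "'", '\\']
--     for char in invalid_chars:
--         if char in name:
--             return False
--
--     # Cannot be empty or start with a digit
--     if not name or name[0].isdigit():
--         return False
--
--     # Should not be shell keywords (basic list)
--     keywords = {'if', 'then', 'else', 'elif', 'fi', 'for', 'while', 'do', 'done',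
--                'case', 'esac', 'function', 'return', 'in'}
--     if name in keywords:
--         return False
--
--     return True
-- ===== SOURCE B (Python) =====
-- _KEYWORDS = frozenset({'if', 'then', 'else', 'elif', 'fi', 'for', 'while', 'do', 'done',
--                        'case', 'esac', 'function', 'return', 'in'})
-- _FORBIDDEN = '=/ \t\n|&;()<>`$"\'\\'
--
-- def _is_valid_alias_name(name: str) -> bool:
--     """Check if alias name is valid: one pass over the characters."""
--     if not name:
--         return False
--     for i, c in enumerate(name):
--         if c in _FORBIDDEN or (i == 0 and c.isdigit()):
--             return False
--     return name not in _KEYWORDS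
-- ===== Notes on version B (the rewrite author's own statement) =====
-- stated objective: alternative
-- what changed: A makes up to 17 staged substring scans of name (one per forbidden character) plus a separate first-character digit check and empty re-check; B makes a single enumerated pass over name's characters, rejecting each one against the forbidden set with the digit check folded into position 0, then tests keyword membership once.
import Mathlib
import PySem

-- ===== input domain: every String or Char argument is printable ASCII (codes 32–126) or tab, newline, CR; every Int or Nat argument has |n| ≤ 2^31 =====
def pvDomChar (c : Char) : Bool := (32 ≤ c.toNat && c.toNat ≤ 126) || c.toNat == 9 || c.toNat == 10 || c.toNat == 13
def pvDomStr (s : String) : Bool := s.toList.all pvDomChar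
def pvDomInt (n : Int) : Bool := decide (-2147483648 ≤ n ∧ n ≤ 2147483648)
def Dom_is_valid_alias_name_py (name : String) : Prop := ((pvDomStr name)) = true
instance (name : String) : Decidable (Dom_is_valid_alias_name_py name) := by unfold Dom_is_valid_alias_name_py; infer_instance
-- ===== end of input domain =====

-- B replaces A's staged per-forbidden-character substring scans by a single recursive pass
-- over name's positions (digit check folded into position 0); alternative decomposition, not claimed faster.
-- ===== PORT A =====
def invalidCharsA : List String :=
  ["=", "/", " ", "\t", "\n", "|", "&", ";", "(", ")", "<", ">", "`", "$", "\"", "'", "\\"]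

def keywordsA : PySem.Set String :=
  PySem.Set.ofList ["if", "then", "else", "elif", "fi", "for", "while", "do", "done",
    "case", "esac", "function", "return", "in"]

def is_valid_alias_name_py (name : String) : Bool :=
  if name.toList = [] then false
  else if invalidCharsA.any (fun ch => PySem.Str.isIn ch name) then false
  else if name.toList = [] || (PySem.Str.pyGet? name 0).elim false PySem.Chars.isdigit then false
  else if PySem.Set.contains keywordsA name then false
  else true

-- ===== PORT B =====
-- Follows Source B: one enumerated pass over name's characters with an early return (ported as
-- structural recursion okB over the suffix list with its starting index), then the keyword test.
def forbiddenB : List Char :=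
  ['=', '/', ' ', '\t', '\n', '|', '&', ';', '(', ')', '<', '>', '`', '$', '"', '\'', '\\']

def keywordsB : PySem.Set String :=
  PySem.Set.ofList ["if", "then", "else", "elif", "fi", "for", "while", "do", "done",
    "case", "esac", "function", "return", "in"]

def okB : Nat → List Char → Bool
  | _, [] => true
  | i, c :: rest =>
    if c ∈ forbiddenB || (i == 0 && PySem.Chars.isdigit c) then false
    else okB (i + 1) rest

def is_valid_alias_name_py_alt (name : String) : Bool :=
  if name.toList = [] then false
  else okB 0 name.toList && !(PySem.Set.contains keywordsB name)

-- ===== PRECONDITION & SPEC =====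
def Spec_is_valid_alias_name_py (name : String) (out : Bool) : Prop := out = is_valid_alias_name_py_alt name
instance (name : String) (out : Bool) : Decidable (Spec_is_valid_alias_name_py name out) := by unfold Spec_is_valid_alias_name_py; infer_instance

-- ===== CLAIM (what is proved, stated in full; the proofs are below) =====
def Claim_equal_is_valid_alias_name_py : Prop := ∀ (name : String), Dom_is_valid_alias_name_py name → Spec_is_valid_alias_name_py name (is_valid_alias_name_py name)

-- ===== LEMMAS AND PROOFS =====
theorem pv_singleton_infix_iff_mem {a : Char} {l : List Char} : [a] <:+: l ↔ a ∈ l := by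
  constructor
  · intro h; exact h.subset (by simp)
  · intro h
    obtain ⟨s, t, rfl⟩ := List.append_of_mem h
    exact ⟨s, t, by simp⟩

theorem pv_any_eq_any_mem (name : String) :
    invalidCharsA.any (fun ch => PySem.Str.isIn ch name)
      = name.toList.any (fun c => decide (c ∈ forbiddenB)) := by
  rw [Bool.eq_iff_iff]
  simp only [invalidCharsA, forbiddenB, List.any_cons, List.any_nil, Bool.or_eq_true,
    PySem.Str.isIn_iff_infix, List.any_eq_true, decide_eq_true_eq,
    show ("=" : String).toList = ['='] from rfl,
    show ("/" : String).toList = ['/'] from rfl,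
    show (" " : String).toList = [' '] from rfl,
    show ("\t" : String).toList = ['\t'] from rfl,
    show ("\n" : String).toList = ['\n'] from rfl,
    show ("|" : String).toList = ['|'] from rfl,
    show ("&" : String).toList = ['&'] from rfl,
    show (";" : String).toList = [';'] from rfl,
    show ("(" : String).toList = ['('] from rfl,
    show (")" : String).toList = [')'] from rfl,
    show ("<" : String).toList = ['<'] from rfl,
    show (">" : String).toList = ['>'] from rfl,
    show ("`" : String).toList = ['`'] from rfl,
    show ("$" : String).toList = ['$'] from rfl,
    show ("\"" : String).toList = ['\"'] from rfl,
    show ("\'" : String).toList = ['\''] from rfl,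
    show ("\\" : String).toList = ['\\'] from rfl,
    pv_singleton_infix_iff_mem, Bool.false_eq_true, or_false]
  constructor
  · rintro (h|h|h|h|h|h|h|h|h|h|h|h|h|h|h|h|h) <;> exact ⟨_, h, by simp⟩
  · rintro ⟨x, hmem, hx⟩
    fin_cases hx <;> tauto

theorem pv_okB_pos (l : List Char) (i : Nat) (hi : i ≠ 0) :
    okB i l = l.all (fun c => decide (c ∉ forbiddenB)) := by
  induction l generalizing i with
  | nil => simp [okB]
  | cons c rest ih =>
    simp only [okB, List.all_cons]
    by_cases hc : c ∈ forbiddenB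
    · simp [hc]
    · have : (i == 0) = false := by simpa using hi
      simp [hc, this, ih (i + 1) (by omega)]

theorem pv_keywords_eq : keywordsB = keywordsA := rfl

-- ===== VERDICT (by name: the statement is the Claim_ definition above) =====
theorem is_valid_alias_name_py_spec : Claim_equal_is_valid_alias_name_py := by
  intro name _
  unfold Spec_is_valid_alias_name_py is_valid_alias_name_py is_valid_alias_name_py_alt
  rw [pv_any_eq_any_mem, pv_keywords_eq]
  cases h0 : name.toList with
  | nil => simp
  | cons c rest =>
    have hget : PySem.Str.pyGet? name 0 = some c := by
      simp [PySem.Str.pyGet?, h0]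
    simp only [List.any_cons, okB, reduceCtorEq, if_false, Bool.false_or,
      Bool.not_false, Bool.true_and, hget, Option.elim, decide_false, beq_self_eq_true,
      Bool.true_and]
    by_cases hc : c ∈ forbiddenB
    · simp [hc]
    · rw [pv_okB_pos rest 1 (by omega)]
      by_cases hd : PySem.Chars.isdigit c = true
      · simp [hc, hd]
      · simp only [hc, decide_false, Bool.false_or, hd]
        have hall : (rest.any fun c => decide (c ∈ forbiddenB))
            = !(rest.all fun c => decide (c ∉ forbiddenB)) := by
          simp [List.any_eq_not_all_not]
        rw [hall]
        cases hr : rest.all fun c => decide (c ∉ forbiddenB) <;>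
          cases hk : PySem.Set.contains keywordsA name <;> simp
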